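-- pv_equiv track=rewrite | github.com/goitakhil/cs_undergrad | cs421/exam2/p3/brute.py | combos
-- ===== SOURCE A (Python) =====
-- def combos(S, L, size, maxsize):
--     '''Generate the power set of S recursively.'''
--     result = []
--     for i in S:
--         if i not in L:
--             newitem = L.copy()  # Not an exact copy of the algo, because python
--             newitem.append(i)   # passes by container reference.
--             result.append(tuple(sorted(newitem)))
--             result.extend(combos(S, newitem, size+1, maxsize))
--     return result
-- ===== SOURCE B (Python) =====
-- def combos(S, L, size, maxsize):
--     '''Generate the power set of S with an explicit-stack iterative DFS.'''
--     result = []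
--     stack = [L + [i] for i in reversed(S) if i not in L]
--     while stack:
--         p = stack.pop()
--         result.append(tuple(sorted(p)))
--         for j in reversed(S):
--             if j not in p:
--                 stack.append(p + [j])
--     return result
-- ===== Notes on version B (the rewrite author's own statement) =====
-- stated objective: alternative
-- what changed: Replaces the recursion with an explicit-stack iterative preorder DFS: prefixes are pushed in reverse S-order so pops emit tuples in A's exact order, with no call stack.
import Mathlib
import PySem

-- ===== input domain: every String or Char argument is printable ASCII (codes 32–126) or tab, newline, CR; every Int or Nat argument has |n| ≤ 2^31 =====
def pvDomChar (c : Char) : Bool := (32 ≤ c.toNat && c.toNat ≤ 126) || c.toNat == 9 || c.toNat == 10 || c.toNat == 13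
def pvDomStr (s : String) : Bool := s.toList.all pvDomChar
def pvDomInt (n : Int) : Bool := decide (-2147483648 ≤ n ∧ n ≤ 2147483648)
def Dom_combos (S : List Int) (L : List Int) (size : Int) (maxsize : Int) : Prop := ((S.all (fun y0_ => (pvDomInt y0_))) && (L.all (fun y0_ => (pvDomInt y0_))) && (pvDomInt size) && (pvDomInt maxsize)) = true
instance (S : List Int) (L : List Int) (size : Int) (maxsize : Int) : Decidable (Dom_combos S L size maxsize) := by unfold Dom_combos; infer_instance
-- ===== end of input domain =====

-- B: same values, but the recursion is replaced by an explicit-stack iterative preorder DFS (objective: alternative decomposition, same cost).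

-- termination helper used by both ports: extending the prefix by a fresh element of S
-- strictly shrinks the set of still-available distinct values
theorem card_sdiff_append_lt (S L : List Int) (i : Int) (hiS : i ∈ S) (hiL : i ∉ L) :
    (S.toFinset \ (L ++ [i]).toFinset).card < (S.toFinset \ L.toFinset).card := by
  apply Finset.card_lt_card
  have hsub : S.toFinset \ (L ++ [i]).toFinset ⊆ S.toFinset \ L.toFinset := by
    intro x hx
    simp only [Finset.mem_sdiff, List.mem_toFinset, List.mem_append, List.mem_singleton] at hx ⊢
    exact ⟨hx.1, fun h => hx.2 (Or.inl h)⟩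
  refine Finset.ssubset_iff_of_subset hsub |>.mpr ⟨i, ?_, ?_⟩
  · simp [hiS, hiL]
  · simp

-- ===== PORT A =====
-- literal transliteration of A; rem is the still-unprocessed suffix of the for-loop over S
def combosGo (S : List Int) (rem : List Int) (L : List Int) (size : Int) (maxsize : Int)
    (hrem : rem ⊆ S) : List (List Int) :=
  match rem with
  | [] => []
  | i :: rest =>
    if hiL : i ∈ L then  -- hiL used in the termination proof
      combosGo S rest L size maxsize (fun _ h => hrem (List.mem_cons_of_mem _ h))
    else
      -- newitem = L.copy(); newitem.append(i); emit tuple(sorted(newitem)); recurse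
      PySem.List.sorted (L ++ [i]) (fun x => x) false ::
        (combosGo S S (L ++ [i]) (size + 1) maxsize (fun _ h => h) ++
         combosGo S rest L size maxsize (fun _ h => hrem (List.mem_cons_of_mem _ h)))
termination_by ((S.toFinset \ L.toFinset).card, rem.length)
decreasing_by
  · exact Prod.Lex.right _ (Nat.lt_succ_self _)
  · exact Prod.Lex.left _ _ (card_sdiff_append_lt S L i (hrem List.mem_cons_self) hiL)
  · exact Prod.Lex.right _ (Nat.lt_succ_self _)

def combos (S : List Int) (L : List Int) (size : Int) (maxsize : Int) : List (List Int) :=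
  combosGo S S L size maxsize (fun _ h => h)

-- ===== PORT B =====
-- push p+[j] for j in reversed(S), j not in p, onto a head-is-top stack (the Python list's end)
def pushExts (S : List Int) (p : List Int) (st : List (List Int)) : List (List Int) :=
  S.reverse.foldl (fun st j => if j ∈ p then st else (p ++ [j]) :: st) st

theorem pushExts_eq (S p : List Int) (st : List (List Int)) :
    pushExts S p st = (S.filter (fun j => decide (j ∉ p))).map (fun j => p ++ [j]) ++ st := by
  induction S with
  | nil => simp [pushExts]
  | cons a S ih =>
    simp only [pushExts, List.reverse_cons, List.foldl_append, List.foldl_cons, List.foldl_nil]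
    by_cases h : a ∈ p <;> simp [pushExts, h] at ih ⊢ <;> simp [ih]

def stackW (S : List Int) (stack : List (List Int)) : Nat :=
  (stack.map (fun p => (S.length + 1) ^ ((S.toFinset \ p.toFinset).card))).sum

theorem stackW_push_lt (S p : List Int) (rest : List (List Int)) :
    stackW S (pushExts S p rest) < stackW S (p :: rest) := by
  rw [pushExts_eq]
  simp only [stackW, List.map_append, List.sum_append, List.map_cons, List.sum_cons,
    List.map_map]
  have key : ((S.filter (fun j => decide (j ∉ p))).map
      ((fun q => (S.length + 1) ^ ((S.toFinset \ q.toFinset).card)) ∘ fun j => p ++ [j])).sum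
      < (S.length + 1) ^ ((S.toFinset \ p.toFinset).card) := by
    by_cases hne : (S.filter (fun j => decide (j ∉ p))) = []
    · rw [hne]
      exact Nat.pow_pos (Nat.succ_pos _)
    · have hd1 : 1 ≤ (S.toFinset \ p.toFinset).card := by
        obtain ⟨j, hj⟩ := List.exists_mem_of_ne_nil _ hne
        simp only [List.mem_filter, decide_eq_true_eq] at hj
        have hmem : j ∈ S.toFinset \ p.toFinset := by simp [hj.1, hj.2]
        have := Finset.card_pos.mpr ⟨j, hmem⟩
        omega
      have hbound : ∀ x ∈ (S.filter (fun j => decide (j ∉ p))).map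
          ((fun q => (S.length + 1) ^ ((S.toFinset \ q.toFinset).card)) ∘ fun j => p ++ [j]),
          x ≤ (S.length + 1) ^ ((S.toFinset \ p.toFinset).card - 1) := by
        intro x hx
        simp only [List.mem_map, Function.comp, List.mem_filter, decide_eq_true_eq] at hx
        obtain ⟨j, ⟨hjS, hjp⟩, rfl⟩ := hx
        have hlt := card_sdiff_append_lt S p j hjS hjp
        exact Nat.pow_le_pow_right (Nat.succ_le_succ (Nat.zero_le _)) (by omega)
      have hsum := List.sum_le_card_nsmul _ _ hbound
      have hlen : ((S.filter (fun j => decide (j ∉ p))).map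
          ((fun q => (S.length + 1) ^ ((S.toFinset \ q.toFinset).card)) ∘ fun j => p ++ [j])).length
          ≤ S.length := by
        simp only [List.length_map]
        exact List.length_filter_le _ _
      have hle : ((S.filter (fun j => decide (j ∉ p))).map
          ((fun q => (S.length + 1) ^ ((S.toFinset \ q.toFinset).card)) ∘ fun j => p ++ [j])).sum
          ≤ S.length * (S.length + 1) ^ ((S.toFinset \ p.toFinset).card - 1) := by
        refine le_trans hsum ?_
        simp only [smul_eq_mul]
        exact Nat.mul_le_mul_right _ hlen
      have hpow : S.length * (S.length + 1) ^ ((S.toFinset \ p.toFinset).card - 1)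
          < (S.length + 1) ^ ((S.toFinset \ p.toFinset).card) := by
        have hrw : (S.length + 1) ^ ((S.toFinset \ p.toFinset).card)
            = (S.length + 1) * (S.length + 1) ^ ((S.toFinset \ p.toFinset).card - 1) := by
          rw [← pow_succ']
          congr 1
          omega
        rw [hrw]
        exact (Nat.mul_lt_mul_right (Nat.pow_pos (Nat.succ_pos _))).mpr (Nat.lt_succ_self _)
      omega
  omega

def altLoop (S : List Int) (stack : List (List Int)) (acc : List (List Int)) : List (List Int) :=
  match stack with
  | [] => acc
  | p :: rest =>
      altLoop S (pushExts S p rest) (acc ++ [PySem.List.sorted p (fun x => x) false])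
termination_by stackW S stack
decreasing_by
  exact stackW_push_lt S p rest

def combos_alt (S : List Int) (L : List Int) (size : Int) (maxsize : Int) : List (List Int) :=
  altLoop S (pushExts S L []) []

-- ===== PRECONDITION & SPEC =====
def Spec_combos (S : List Int) (L : List Int) (size : Int) (maxsize : Int) (out : List (List Int)) : Prop := out = combos_alt S L size maxsize
instance (S : List Int) (L : List Int) (size : Int) (maxsize : Int) (out : List (List Int)) : Decidable (Spec_combos S L size maxsize out) := by unfold Spec_combos; infer_instance

-- ===== CLAIM (what is proved, stated in full; the proofs are below) =====
def Claim_equal_combos : Prop := ∀ (S : List Int) (L : List Int) (size : Int) (maxsize : Int), Dom_combos S L size maxsize → Spec_combos S L size maxsize (combos S L size maxsize)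

-- ===== LEMMAS AND PROOFS =====

-- preorder subtree emitted below a prefix (size/maxsize are never read, so 0,0)
def node (S : List Int) (p : List Int) : List (List Int) :=
  PySem.List.sorted p (fun x => x) false :: combosGo S S p 0 0 (fun _ h => h)

-- A's loop over rem characterised: each fresh i contributes its sorted prefix and its subtree
theorem combosGo_eq_flatMap (S : List Int) : ∀ n rem L (s m : Int) (h : rem ⊆ S),
    (S.toFinset \ L.toFinset).card = n →
    combosGo S rem L s m h =
      (rem.filter (fun i => decide (i ∉ L))).flatMap (fun i => node S (L ++ [i])) := by
  intro n
  induction n using Nat.strong_induction_on with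
  | _ n ihn =>
    intro rem L s m h hc
    induction rem with
    | nil => rw [combosGo]; simp
    | cons i rest ihrem =>
      rw [combosGo]
      by_cases hiL : i ∈ L
      · simp only [hiL, dif_pos, not_true_eq_false, decide_false, List.filter_cons_of_neg,
          Bool.false_eq_true, not_false_eq_true]
        exact ihrem _
      · have hiS : i ∈ S := h List.mem_cons_self
        have hlt := card_sdiff_append_lt S L i hiS hiL
        simp only [hiL, dif_neg, not_false_eq_true, decide_true, List.filter_cons_of_pos,
          List.flatMap_cons]
        rw [ihn _ (by omega) S (L ++ [i]) (s + 1) m (fun _ hx => hx) rfl]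
        rw [ihrem (fun _ hx => h (List.mem_cons_of_mem _ hx))]
        simp only [node]
        rw [ihn _ (by omega) S (L ++ [i]) 0 0 (fun _ hx => hx) rfl]
        simp [node]

-- B's stack loop characterised: it emits acc then each stacked prefix's subtree in order
theorem altLoop_eq (S : List Int) : ∀ n stack acc, stackW S stack = n →
    altLoop S stack acc = acc ++ stack.flatMap (node S) := by
  intro n
  induction n using Nat.strong_induction_on with
  | _ n ih =>
    intro stack acc hn
    match stack with
    | [] => rw [altLoop]; simp
    | p :: rest =>
      rw [altLoop]
      rw [ih _ (hn ▸ stackW_push_lt S p rest) _ _ rfl]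
      rw [pushExts_eq, List.flatMap_append, List.flatMap_map, List.flatMap_cons]
      conv_rhs => rw [node, combosGo_eq_flatMap S _ S p 0 0 (fun _ hx => hx) rfl]
      simp

-- ===== VERDICT (by name: the statement is the Claim_ definition above) =====
theorem combos_spec : Claim_equal_combos := by
  intro S L size maxsize _
  unfold Spec_combos combos combos_alt
  rw [altLoop_eq S _ _ _ rfl, pushExts_eq, List.append_nil, List.flatMap_map,
    combosGo_eq_flatMap S _ S L size maxsize (fun _ h => h) rfl]
  rfl
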